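-- pv_equiv track=rewrite | github.com/Tellsanguis/wheresmycobblemon | wherepokemon.py | split_long_field
-- ===== SOURCE A (Python) =====
-- def split_long_field(label, emoji, value, max_length=1700):
--     """Divise un champ trop long en plusieurs parties."""
--     if len(value) <= max_length:
--         return [f"{emoji} **{label}** : {value}"]
--
--     items = [item.strip() for item in value.split('|') if item.strip()]
--
--     parts = []
--     current_part = []
--     current_length = 0
--     base_prefix = f"{emoji} **{label}** : "
--     cont_prefix = f"{emoji} **{label} (suite)** : "
--
--     for item in items:
--         prefix = base_prefix if not current_part else cont_prefix
--         item_length = len(item) + 3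
--
--         if current_part and (current_length + item_length + len(prefix) > max_length):
--             parts.append(prefix + " | ".join(current_part))
--             current_part = [item]
--             current_length = item_length
--         else:
--             current_part.append(item)
--             current_length += item_length
--
--     if current_part:
--         prefix = base_prefix if not parts else cont_prefix
--         parts.append(prefix + " | ".join(current_part))
--
--     return parts
-- ===== SOURCE B (Python) =====
-- def split_long_field(label, emoji, value, max_length=1700):
--     """Two-pass rewrite: greedily cut the cleaned items into groups against a fixed
--     length budget, then format all groups at once (base prefix only when there is a
--     single group, continuation prefix otherwise)."""
--     base_prefix = f"{emoji} **{label}** : "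
--     if len(value) <= max_length:
--         return [base_prefix + value]
--     items = [s.strip() for s in value.split('|') if s.strip()]
--     cont_prefix = f"{emoji} **{label} (suite)** : "
--     budget = max_length - len(cont_prefix)
--     groups = []
--     rest = items
--     while rest:
--         group, rest = _take_group(rest, budget)
--         groups.append(group)
--     pre = base_prefix if len(groups) == 1 else cont_prefix
--     return [pre + " | ".join(g) for g in groups]
--
--
-- def _take_group(items, budget):
--     """First group of a greedy cut of items against budget, and the remainder."""
--     group = [items[0]]
--     w = len(items[0]) + 3
--     rest = items[1:]
--     while rest and w + len(rest[0]) + 3 <= budget: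
--         group.append(rest[0])
--         w += len(rest[0]) + 3
--         rest = rest[1:]
--     return group, rest
-- ===== Notes on version B (the rewrite author's own statement) =====
-- stated objective: alternative
-- what changed: Replaces A's single fold that interleaves grouping state with immediate formatting by a two-pass design: a greedy cutter that slices the cleaned items into groups against a precomputed length budget, then one formatting pass that joins each group and picks the prefix from the total group count.
import Mathlib
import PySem

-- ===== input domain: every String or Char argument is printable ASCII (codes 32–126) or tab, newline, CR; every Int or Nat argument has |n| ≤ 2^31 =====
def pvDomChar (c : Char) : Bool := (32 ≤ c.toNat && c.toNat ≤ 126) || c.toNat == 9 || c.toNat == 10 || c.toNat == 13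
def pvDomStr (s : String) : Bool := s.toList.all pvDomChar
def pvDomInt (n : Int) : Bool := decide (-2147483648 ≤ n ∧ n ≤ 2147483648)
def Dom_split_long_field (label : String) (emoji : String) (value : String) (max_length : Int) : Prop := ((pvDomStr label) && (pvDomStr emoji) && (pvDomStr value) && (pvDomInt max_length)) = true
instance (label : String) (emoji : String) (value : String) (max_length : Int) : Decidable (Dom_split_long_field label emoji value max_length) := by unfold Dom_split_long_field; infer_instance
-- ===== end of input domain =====

-- B replaces A's fold-with-immediate-formatting by a greedy group cutter plus a
-- separate formatting pass (objective: alternative decomposition, same cost).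

-- ===== PORT A =====
-- one step of A's for-loop, state = (parts, current_part, current_length)
def pvStepA (base_prefix cont_prefix : List Char) (max_length : Int)
    (st : List (List Char) × List (List Char) × Int) (item : List Char) :
    List (List Char) × List (List Char) × Int :=
  let (parts, current_part, current_length) := st
  let pfx := if current_part = [] then base_prefix else cont_prefix
  let item_length : Int := (item.length : Int) + 3
  if current_part ≠ [] ∧ current_length + item_length + (pfx.length : Int) > max_length then
    (parts ++ [pfx ++ PySem.Chars.join " | ".toList current_part], [item], item_length)
  else
    (parts, current_part ++ [item], current_length + item_length)

-- A's final 'if current_part:' flush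
def pvFinishA (base_prefix cont_prefix : List Char)
    (st : List (List Char) × List (List Char) × Int) : List (List Char) :=
  if st.2.1 ≠ [] then
    st.1 ++ [(if st.1 = [] then base_prefix else cont_prefix) ++ PySem.Chars.join " | ".toList st.2.1]
  else st.1

def split_long_field (label : String) (emoji : String) (value : String) (max_length : Int) : List String :=
  if (value.toList.length : Int) ≤ max_length then
    [String.ofList (emoji.toList ++ " **".toList ++ label.toList ++ "** : ".toList ++ value.toList)]
  else
    let items := ((PySem.Chars.splitOn value.toList ['|']).map PySem.Chars.strip).filter (· ≠ [])
    let base_prefix := emoji.toList ++ " **".toList ++ label.toList ++ "** : ".toList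
    let cont_prefix := emoji.toList ++ " **".toList ++ label.toList ++ " (suite)** : ".toList
    let st := items.foldl (pvStepA base_prefix cont_prefix max_length) ([], [], 0)
    (pvFinishA base_prefix cont_prefix st).map String.ofList

-- ===== PORT B =====
-- inner while of _take_group: extend the group while the next item still fits the budget
def pvTakeRest (budget : Int) (w : Int) : List (List Char) → List (List Char) × List (List Char)
  | [] => ([], [])
  | x :: xs =>
    if w + ((x.length : Int) + 3) ≤ budget then
      let p := pvTakeRest budget (w + ((x.length : Int) + 3)) xs
      (x :: p.1, p.2)
    else
      ([], x :: xs)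

theorem pvTakeRest_snd_length (budget w : Int) (xs : List (List Char)) :
    (pvTakeRest budget w xs).2.length ≤ xs.length := by
  induction xs generalizing w with
  | nil => simp [pvTakeRest]
  | cons x xs ih =>
    simp only [pvTakeRest]
    split
    · exact Nat.le_succ_of_le (ih _)
    · simp

-- outer while of B: cut items into greedy groups (_take_group = first group + remainder)
def pvGroupsOf (budget : Int) : List (List Char) → List (List (List Char))
  | [] => []
  | x :: xs =>
    let p := pvTakeRest budget ((x.length : Int) + 3) xs
    (x :: p.1) :: pvGroupsOf budget p.2
termination_by l => l.length
decreasing_by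
  exact Nat.lt_succ_of_le (pvTakeRest_snd_length _ _ _)

def split_long_field_alt (label : String) (emoji : String) (value : String) (max_length : Int) : List String :=
  let base_prefix := emoji.toList ++ " **".toList ++ label.toList ++ "** : ".toList
  if (value.toList.length : Int) ≤ max_length then
    [String.ofList (base_prefix ++ value.toList)]
  else
    let items := ((PySem.Chars.splitOn value.toList ['|']).map PySem.Chars.strip).filter (· ≠ [])
    let cont_prefix := emoji.toList ++ " **".toList ++ label.toList ++ " (suite)** : ".toList
    let budget := max_length - (cont_prefix.length : Int)
    let groups := pvGroupsOf budget items
    let pre := if groups.length = 1 then base_prefix else cont_prefix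
    groups.map (fun g => String.ofList (pre ++ PySem.Chars.join " | ".toList g))

-- ===== PRECONDITION & SPEC =====
def Spec_split_long_field (label : String) (emoji : String) (value : String) (max_length : Int) (out : List String) : Prop := out = split_long_field_alt label emoji value max_length
instance (label : String) (emoji : String) (value : String) (max_length : Int) (out : List String) : Decidable (Spec_split_long_field label emoji value max_length out) := by unfold Spec_split_long_field; infer_instance

-- ===== CLAIM (what is proved, stated in full; the proofs are below) =====
def Claim_equal_split_long_field : Prop := ∀ (label : String) (emoji : String) (value : String) (max_length : Int), Dom_split_long_field label emoji value max_length → Spec_split_long_field label emoji value max_length (split_long_field label emoji value max_length)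

-- ===== LEMMAS AND PROOFS =====

-- target shape of A's tail (loop rest + final flush) as a function of parts and B's groups
def pvFmt (base cont : List Char) (parts : List (List Char)) (gs : List (List (List Char))) :
    List (List Char) :=
  if parts = [] ∧ gs.length = 1 then [base ++ PySem.Chars.join " | ".toList (gs.headD [])]
  else parts ++ gs.map (fun g => cont ++ PySem.Chars.join " | ".toList g)

theorem pvMain (base cont : List Char) (maxL : Int) (items : List (List Char))
    (parts cur : List (List Char)) (w : Int) (hcur : cur ≠ []) :
    pvFinishA base cont (items.foldl (pvStepA base cont maxL) (parts, cur, w)) =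
      pvFmt base cont parts
        ((cur ++ (pvTakeRest (maxL - (cont.length : Int)) w items).1) ::
          pvGroupsOf (maxL - (cont.length : Int)) (pvTakeRest (maxL - (cont.length : Int)) w items).2) := by
  induction items generalizing parts cur w with
  | nil =>
    simp only [List.foldl_nil, pvTakeRest, pvGroupsOf, pvFinishA, pvFmt, List.append_nil]
    by_cases hp : parts = [] <;> simp [hp, hcur]
  | cons it rest ih =>
    simp only [List.foldl_cons]
    by_cases hfit : w + ((it.length : Int) + 3) ≤ maxL - (cont.length : Int)
    · have hstep : pvStepA base cont maxL (parts, cur, w) it =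
          (parts, cur ++ [it], w + ((it.length : Int) + 3)) := by
        simp only [pvStepA]
        rw [if_neg (by rintro ⟨-, hgt⟩; rw [if_neg hcur] at hgt; omega)]
      rw [hstep, ih parts (cur ++ [it]) _ (by simp)]
      simp only [pvTakeRest, if_pos hfit]
      congr 2
      simp
    · have hstep : pvStepA base cont maxL (parts, cur, w) it =
          (parts ++ [cont ++ PySem.Chars.join " | ".toList cur], [it], (it.length : Int) + 3) := by
        simp only [pvStepA]
        rw [if_pos ⟨hcur, by rw [if_neg hcur]; omega⟩, if_neg hcur]
      rw [hstep, ih _ [it] _ (by simp)]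
      have h2 : pvTakeRest (maxL - (cont.length : Int)) w (it :: rest) = ([], it :: rest) := by
        simp only [pvTakeRest, if_neg hfit]
      rw [h2]
      simp only [pvFmt, pvGroupsOf, List.append_nil, List.singleton_append]
      rw [if_neg (by simp), if_neg (by simp)]
      simp

theorem pvFmt_nil (base cont : List Char) (gs : List (List (List Char))) (h : gs ≠ []) :
    pvFmt base cont [] gs =
      gs.map (fun g => (if gs.length = 1 then base else cont) ++ PySem.Chars.join " | ".toList g) := by
  match gs, h with
  | [g], _ => simp [pvFmt]
  | g1 :: g2 :: t, _ => simp [pvFmt]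

theorem pvTop (base cont : List Char) (maxL : Int) (items : List (List Char)) :
    pvFinishA base cont (items.foldl (pvStepA base cont maxL) ([], [], 0)) =
      (pvGroupsOf (maxL - (cont.length : Int)) items).map
        (fun g => (if (pvGroupsOf (maxL - (cont.length : Int)) items).length = 1 then base else cont)
          ++ PySem.Chars.join " | ".toList g) := by
  match items with
  | [] => simp [pvFinishA, pvGroupsOf]
  | x :: xs =>
    have hstep0 : pvStepA base cont maxL ([], [], 0) x = ([], [x], 0 + ((x.length : Int) + 3)) := by
      simp [pvStepA]
    rw [List.foldl_cons, hstep0,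
      pvMain base cont maxL xs [] [x] (0 + ((x.length : Int) + 3)) (by simp)]
    have hw : (0 : Int) + ((x.length : Int) + 3) = (x.length : Int) + 3 := by omega
    rw [hw]
    have hg : pvGroupsOf (maxL - (cont.length : Int)) (x :: xs) =
        (x :: (pvTakeRest (maxL - (cont.length : Int)) ((x.length : Int) + 3) xs).1) ::
          pvGroupsOf (maxL - (cont.length : Int))
            (pvTakeRest (maxL - (cont.length : Int)) ((x.length : Int) + 3) xs).2 := by
      simp only [pvGroupsOf]
    rw [hg, pvFmt_nil base cont _ (by simp)]
    simp

-- ===== VERDICT (by name: the statement is the Claim_ definition above) =====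
theorem split_long_field_spec : Claim_equal_split_long_field := by
  intro label emoji value max_length _
  show split_long_field label emoji value max_length = split_long_field_alt label emoji value max_length
  unfold split_long_field split_long_field_alt
  by_cases hshort : ((value.toList.length : Int) ≤ max_length)
  · rw [if_pos hshort, if_pos hshort]
  · rw [if_neg hshort, if_neg hshort]
    have h := congrArg (List.map String.ofList)
      (pvTop (emoji.toList ++ " **".toList ++ label.toList ++ "** : ".toList)
        (emoji.toList ++ " **".toList ++ label.toList ++ " (suite)** : ".toList) max_length
        (((PySem.Chars.splitOn value.toList ['|']).map PySem.Chars.strip).filter (· ≠ [])))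
    rw [List.map_map] at h
    simp only [Function.comp_def] at h
    exact h
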